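-- pv_equiv track=rewrite | github.com/lukebor/hackerrank_python | Lisa's Workbook/Lisa's Workbook1.0.py | workbook
-- ===== SOURCE A (Python) =====
-- def workbook(n, k, arr):
--     page=1
--     res=0
--     for i in arr:
--         for j in range(1,i+1):
--             if j==page: res+=1
--             if j%k==0: page+=1
--         if i%k!=0: page+=1
--     return res
-- ===== SOURCE B (Python) =====
-- def workbook(n, k, arr):
--     res = 0
--     p0 = 1  # page on which the current chapter starts
--     for i in arr:
--         if k == 1:
--             # one problem per page: problem j lands on page p0 + j - 1,
--             # so the chapter's problems are all special iff p0 == 1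
--             if p0 == 1:
--                 res += len(range(1, i + 1))
--         else:
--             # problem j sits on page p0 + (j-1)//k; solving j = p0 + (j-1)//k
--             # pins (j-1)//k to q = (p0-1)//(k-1) (problem p0+q) and, when
--             # (k-1) | (p0-1) and q >= 1, also to q-1 (problem p0+q-1)
--             q, r = divmod(p0 - 1, k - 1)
--             if p0 + q <= i:
--                 res += 1
--             if r == 0 and q >= 1 and p0 + q - 1 <= i:
--                 res += 1
--         # a page is turned after every k-th problem, and once more at the end
--         # of the chapter if its last page is only partly filled
--         p0 += len(range(k, i + 1, k)) + (1 if i % k else 0)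
--     return res
-- ===== Notes on version B (the rewrite author's own statement) =====
-- stated objective: alternative
-- what changed: Instead of simulating every problem of every chapter (inner loop over range(1,i+1)), B computes per chapter the (at most two) special problems from the closed-form solution of j = p0 + (j-1)//k via divmod(p0-1, k-1) and advances the page counter by the chapter's page count len(range(k,i+1,k)) + (1 if i%k else 0); Pre_ restricts k to the natural domain k >= 1, excluding k = 0, where A raises ZeroDivisionError on any nonempty arr, and negative k, where A's pagination via Python's sign-of-divisor modulo is accidental.
-- outside the precondition, e.g. on workbook(1, -1, [2]): A returns 2, B returns 1; on workbook(2, -3, [5, 7]): A returns 3, B returns 2; on workbook(1, 0, [2]): A raises ZeroDivisionError, B raises ValueError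
import Mathlib
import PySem

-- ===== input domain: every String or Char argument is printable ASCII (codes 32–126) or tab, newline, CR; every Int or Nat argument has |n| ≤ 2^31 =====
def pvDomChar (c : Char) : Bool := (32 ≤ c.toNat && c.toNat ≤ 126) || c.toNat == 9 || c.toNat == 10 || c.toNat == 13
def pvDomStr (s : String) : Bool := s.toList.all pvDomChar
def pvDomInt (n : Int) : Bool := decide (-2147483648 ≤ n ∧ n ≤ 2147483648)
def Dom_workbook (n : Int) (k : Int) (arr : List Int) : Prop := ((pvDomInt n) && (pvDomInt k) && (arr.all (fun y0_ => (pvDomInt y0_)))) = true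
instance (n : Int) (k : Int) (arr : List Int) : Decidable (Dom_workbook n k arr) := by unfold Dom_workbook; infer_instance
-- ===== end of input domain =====

-- B replaces A's per-problem simulation by a closed form per chapter
-- (at most two special problems, found via divmod(p0-1, k-1)).

-- ===== PORT A =====
-- state of A's loops: (page, res)
def wbInner (k : Int) (st : Int × Int) (j : Int) : Int × Int :=
  let res := if j = st.1 then st.2 + 1 else st.2
  let page := if PySem.Int.mod j k = 0 then st.1 + 1 else st.1
  (page, res)

def wbChapter (k : Int) (st : Int × Int) (i : Int) : Int × Int :=
  let st2 := (PySem.List.pyRange 1 (i + 1) 1).foldl (wbInner k) st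
  if PySem.Int.mod i k ≠ 0 then (st2.1 + 1, st2.2) else st2

def workbook (n : Int) (k : Int) (arr : List Int) : Int :=
  (arr.foldl (wbChapter k) (1, 0)).2

-- ===== PORT B =====
-- state of B's loop: (res, p0)
def wbAltStep (k : Int) (st : Int × Int) (i : Int) : Int × Int :=
  let res := st.1
  let p0 := st.2
  let res :=
    if k = 1 then
      if p0 = 1 then res + ((PySem.List.pyRange 1 (i + 1) 1).length : Int) else res
    else
      let q := PySem.Int.floordiv (p0 - 1) (k - 1)
      let r := PySem.Int.mod (p0 - 1) (k - 1)
      let res := if p0 + q ≤ i then res + 1 else res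
      if r = 0 ∧ 1 ≤ q ∧ p0 + q - 1 ≤ i then res + 1 else res
  (res, p0 + ((PySem.List.pyRange k (i + 1) k).length : Int) +
        (if PySem.Int.mod i k ≠ 0 then 1 else 0))

def workbook_alt (n : Int) (k : Int) (arr : List Int) : Int :=
  (arr.foldl (wbAltStep k) (0, 1)).1

-- ===== PRECONDITION & SPEC =====
-- Pre_ restricts k to the natural domain 1 ≤ k (at least one problem per page):
-- excluded are k = 0, where A raises ZeroDivisionError on any nonempty arr (and
-- B raises ValueError), and negative k, where A still returns a value but its
-- pagination (j % k == 0 then tests divisibility by |k|) is an accident of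
-- Python's sign-of-divisor modulo that no workbook has.
def Pre_workbook (n : Int) (k : Int) (arr : List Int) : Prop :=
  1 ≤ k
instance (n : Int) (k : Int) (arr : List Int) : Decidable (Pre_workbook n k arr) := by
  unfold Pre_workbook; infer_instance

def pvWitness_workbook : Int × Int × List Int := (5, 3, [4, 2, 6, 1, 10])

def Spec_workbook (n : Int) (k : Int) (arr : List Int) (out : Int) : Prop := out = workbook_alt n k arr
instance (n : Int) (k : Int) (arr : List Int) (out : Int) : Decidable (Spec_workbook n k arr out) := by unfold Spec_workbook; infer_instance

-- ===== CLAIM (what is proved, stated in full; the proofs are below) =====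
def Claim_equal_workbook : Prop := ∀ (n : Int) (k : Int) (arr : List Int), Dom_workbook n k arr → Pre_workbook n k arr → Spec_workbook n k arr (workbook n k arr)

-- ===== LEMMAS AND PROOFS =====

-- page evolution: crossing problem j increments the page exactly when k ∣ j
theorem wb_fd_step (k j : Int) (hk : 1 ≤ k) :
    PySem.Int.floordiv j k =
      PySem.Int.floordiv (j - 1) k + (if PySem.Int.mod j k = 0 then 1 else 0) := by
  have hk0 : (0:Int) < k := by omega
  have hdm := PySem.Int.floordiv_mul_add_mod (j - 1) k
  have h0 := PySem.Int.mod_nonneg (j - 1) hk0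
  have h1 := PySem.Int.mod_lt (j - 1) hk0
  set q := PySem.Int.floordiv (j - 1) k with hq
  set r := PySem.Int.mod (j - 1) k with hr
  by_cases hd : PySem.Int.mod j k = 0
  · obtain ⟨c, hc⟩ := (PySem.Int.mod_eq_zero_iff_dvd j k).mp hd
    have hrk : r + 1 = k := by
      have hdvd : k ∣ (r + 1) := ⟨c - q, by
        have he : k * (c - q) = k * c - q * k := by ring
        linarith⟩
      have := Int.le_of_dvd (by omega) hdvd
      omega
    rw [if_pos hd, (PySem.Int.floordiv_eq_iff_of_pos hk0 : _ ↔ _)]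
    constructor <;> nlinarith
  · have hnd : ¬ k ∣ j := fun h => hd ((PySem.Int.mod_eq_zero_iff_dvd j k).mpr h)
    have hrk : r + 1 < k := by
      rcases eq_or_lt_of_le (by omega : r + 1 ≤ k) with he | h
      · exact absurd ⟨q + 1, by nlinarith⟩ hnd
      · exact h
    rw [if_neg hd, (PySem.Int.floordiv_eq_iff_of_pos hk0 : _ ↔ _)]
    constructor <;> nlinarith

-- the inner fold over pyRange a b, entered on the correct page, counts the matches
theorem wb_inner_fold (k P0 : Int) (hm : 1 ≤ k) :
    ∀ (m : Nat) (a b r : Int), b - a = (m : Int) →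
      (PySem.List.pyRange a b 1).foldl (wbInner k)
          (P0 + PySem.Int.floordiv (a - 1) k, r) =
        (P0 + PySem.Int.floordiv (b - 1) k,
         r + ((PySem.List.pyRange a b 1).countP
                (fun j => decide (j = P0 + PySem.Int.floordiv (j - 1) k)) : Int)) := by
  intro m
  induction m with
  | zero =>
    intro a b r h
    have hba : b = a := by omega
    subst hba
    rw [PySem.List.pyRange_one_eq_nil le_rfl]
    simp
  | succ m ih =>
    intro a b r h
    have hab : a < b := by omega
    rw [PySem.List.pyRange_one_cons hab, List.foldl_cons, List.countP_cons]
    have hstep : wbInner k (P0 + PySem.Int.floordiv (a - 1) k, r) a =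
        (P0 + PySem.Int.floordiv ((a + 1) - 1) k,
         r + if a = P0 + PySem.Int.floordiv (a - 1) k then 1 else 0) := by
      have ha1 : a + 1 - 1 = a := by ring
      simp only [wbInner, Prod.mk.injEq, ha1]
      have hfd := wb_fd_step k a hm
      constructor
      · split_ifs at hfd ⊢ <;> omega
      · split_ifs <;> omega
    rw [hstep, ih (a + 1) b _ (by omega)]
    simp only [Prod.mk.injEq, decide_eq_true_eq]
    refine ⟨trivial, ?_⟩
    push_cast
    split_ifs <;> ring

-- counting membership of two distinct values
theorem countP_two (a b : Int) (hab : a ≠ b) :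
    ∀ l : List Int, l.countP (fun j => decide (j = a ∨ j = b)) = l.count a + l.count b := by
  intro l
  induction l with
  | nil => simp
  | cons x l ih =>
    rw [List.countP_cons, List.count_cons, List.count_cons, ih]
    by_cases hxa : x = a
    · simp [hxa, hab]
      omega
    · by_cases hxb : x = b <;> simp [hxa, hxb, Ne.symm hab] <;> omega

theorem count_pyRange_one (a lo hi : Int) :
    (PySem.List.pyRange lo hi 1).count a = if lo ≤ a ∧ a < hi then 1 else 0 := by
  by_cases hm : lo ≤ a ∧ a < hi
  · rw [if_pos hm]
    exact List.count_eq_one_of_mem (PySem.List.nodup_pyRange_one lo hi)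
      (PySem.List.mem_pyRange_one.mpr hm)
  · rw [if_neg hm]
    exact List.count_eq_zero_of_not_mem (fun h => hm (PySem.List.mem_pyRange_one.mp h))

-- characterisation of the special problems of one chapter (k ≥ 2)
theorem wb_match_iff (k P0 j : Int) (hk2 : 2 ≤ k) (hP : 1 ≤ P0) (hj : 1 ≤ j) :
    (j = P0 + PySem.Int.floordiv (j - 1) k) ↔
      (j = P0 + PySem.Int.floordiv (P0 - 1) (k - 1) ∨
       (PySem.Int.mod (P0 - 1) (k - 1) = 0 ∧ 1 ≤ PySem.Int.floordiv (P0 - 1) (k - 1) ∧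
        j = P0 + PySem.Int.floordiv (P0 - 1) (k - 1) - 1)) := by
  have hk10 : (0:Int) < k - 1 := by omega
  have hk0 : (0:Int) < k := by omega
  have hQdm := PySem.Int.floordiv_mul_add_mod (P0 - 1) (k - 1)
  have hR0 := PySem.Int.mod_nonneg (P0 - 1) hk10
  have hR1 := PySem.Int.mod_lt (P0 - 1) hk10
  have hQ0 : 0 ≤ PySem.Int.floordiv (P0 - 1) (k - 1) :=
    (PySem.Int.le_floordiv_iff_mul_le hk10).mpr (by omega)
  set Q := PySem.Int.floordiv (P0 - 1) (k - 1) with hQ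
  set R := PySem.Int.mod (P0 - 1) (k - 1) with hR
  have hqdm := PySem.Int.floordiv_mul_add_mod (j - 1) k
  have hr0 := PySem.Int.mod_nonneg (j - 1) hk0
  have hr1 := PySem.Int.mod_lt (j - 1) hk0
  have hq0 : 0 ≤ PySem.Int.floordiv (j - 1) k :=
    (PySem.Int.le_floordiv_iff_mul_le hk0).mpr (by omega)
  set q := PySem.Int.floordiv (j - 1) k with hq
  set r := PySem.Int.mod (j - 1) k with hr'
  constructor
  · intro h
    -- r - R = (Q - q) * (k - 1); the window forces Q - q ∈ {0, 1}
    have hkey : r - R = (Q - q) * (k - 1) := by nlinarith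
    have hub : Q - q ≤ 1 := by
      by_contra hgt
      have : 2 * (k - 1) ≤ (Q - q) * (k - 1) :=
        mul_le_mul_of_nonneg_right (by omega) (by omega)
      omega
    have hlb : 0 ≤ Q - q := by
      by_contra hlt
      have : (Q - q) * (k - 1) ≤ (-1) * (k - 1) :=
        mul_le_mul_of_nonneg_right (by omega) (by omega)
      omega
    have : Q - q = 0 ∨ Q - q = 1 := by omega
    rcases this with hd | hd
    · left; omega
    · right
      have h1 : (Q - q) * (k - 1) = k - 1 := by rw [hd]; ring
      refine ⟨by omega, by omega, by omega⟩
  · intro h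
    rcases h with h | ⟨hRz, hQ1, h⟩
    · -- j - 1 = Q * k + R with 0 ≤ R < k, so q = Q
      have : q = Q := by
        rw [hq, (PySem.Int.floordiv_eq_iff_of_pos hk0 : _ ↔ _)]
        constructor <;> nlinarith
      omega
    · -- j - 1 = (Q - 1) * k + (k - 1), so q = Q - 1
      have : q = Q - 1 := by
        rw [hq, (PySem.Int.floordiv_eq_iff_of_pos hk0 : _ ↔ _)]
        constructor <;> nlinarith
      omega

-- the closed-form chapter count
theorem wb_count (k P0 i : Int) (hk : 1 ≤ k) (hP : 1 ≤ P0) (hi : 0 ≤ i) :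
    ((PySem.List.pyRange 1 (i + 1) 1).countP
        (fun j => decide (j = P0 + PySem.Int.floordiv (j - 1) k)) : Int) =
      (if k = 1 then
        if P0 = 1 then i else 0
      else
        (if P0 + PySem.Int.floordiv (P0 - 1) (k - 1) ≤ i then (1 : Int) else 0) +
        (if PySem.Int.mod (P0 - 1) (k - 1) = 0 ∧ 1 ≤ PySem.Int.floordiv (P0 - 1) (k - 1) ∧
            P0 + PySem.Int.floordiv (P0 - 1) (k - 1) - 1 ≤ i then (1 : Int) else 0)) := by
  by_cases hk1 : k = 1
  · subst hk1
    have hfd : ∀ j : Int, PySem.Int.floordiv (j - 1) 1 = j - 1 := fun j => by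
      rw [PySem.Int.floordiv_eq_ediv_of_pos (by omega : (0:Int) < 1)]
      exact Int.ediv_one _
    rw [if_pos rfl]
    by_cases hP1 : P0 = 1
    · subst hP1
      rw [if_pos rfl]
      have hlen : (PySem.List.pyRange 1 (i + 1) 1).countP
          (fun j => decide (j = 1 + PySem.Int.floordiv (j - 1) 1)) =
          (PySem.List.pyRange 1 (i + 1) 1).length := by
        rw [List.countP_eq_length]
        intro j hj
        simp
      rw [hlen, PySem.List.length_pyRange_one]
      omega
    · rw [if_neg hP1]
      have hzero : (PySem.List.pyRange 1 (i + 1) 1).countP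
          (fun j => decide (j = P0 + PySem.Int.floordiv (j - 1) 1)) = 0 := by
        rw [List.countP_eq_zero]
        intro j hj
        simp only [hfd j, decide_eq_true_eq]
        omega
      rw [hzero]
      simp
  · rw [if_neg hk1]
    have hk2 : 2 ≤ k := by omega
    have hQ0 : 0 ≤ PySem.Int.floordiv (P0 - 1) (k - 1) :=
      (PySem.Int.le_floordiv_iff_mul_le (by omega)).mpr (by omega)
    set Q := PySem.Int.floordiv (P0 - 1) (k - 1) with hQdef
    by_cases hc : PySem.Int.mod (P0 - 1) (k - 1) = 0 ∧ 1 ≤ Q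
    · have hcong : (PySem.List.pyRange 1 (i + 1) 1).countP
          (fun j => decide (j = P0 + PySem.Int.floordiv (j - 1) k)) =
          (PySem.List.pyRange 1 (i + 1) 1).countP
          (fun j => decide (j = P0 + Q ∨ j = (P0 + Q) - 1)) := by
        apply List.countP_congr
        intro j hj
        simp only [decide_eq_true_eq]
        rw [wb_match_iff k P0 j hk2 hP (PySem.List.mem_pyRange_one.mp hj).1]
        have h1 := hc.1
        have h2 := hc.2
        constructor
        · rintro (h | ⟨_, _, h⟩)
          · exact Or.inl h
          · exact Or.inr (by omega)
        · rintro (h | h)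
          · exact Or.inl h
          · exact Or.inr ⟨h1, h2, by omega⟩
      rw [hcong, countP_two (P0 + Q) (P0 + Q - 1) (by omega), count_pyRange_one,
        count_pyRange_one]
      push_cast
      split_ifs <;> omega
    · have hcong : (PySem.List.pyRange 1 (i + 1) 1).countP
          (fun j => decide (j = P0 + PySem.Int.floordiv (j - 1) k)) =
          (PySem.List.pyRange 1 (i + 1) 1).countP
          (fun j => decide (j = P0 + Q)) := by
        apply List.countP_congr
        intro j hj
        simp only [decide_eq_true_eq]
        rw [wb_match_iff k P0 j hk2 hP (PySem.List.mem_pyRange_one.mp hj).1]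
        constructor
        · rintro (h | ⟨h1, h2, h⟩)
          · exact h
          · exact absurd ⟨h1, h2⟩ hc
        · exact Or.inl
      have hone : (PySem.List.pyRange 1 (i + 1) 1).countP
          (fun j => decide (j = P0 + Q)) = (PySem.List.pyRange 1 (i + 1) 1).count (P0 + Q) := by
        simp only [List.count]
        apply List.countP_congr
        intro x _
        simp
      have hc3 : ¬(PySem.Int.mod (P0 - 1) (k - 1) = 0 ∧ 1 ≤ Q ∧ P0 + Q - 1 ≤ i) :=
        fun h => hc ⟨h.1, h.2.1⟩
      rw [hcong, hone, count_pyRange_one, if_neg hc3]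
      push_cast
      split_ifs <;> omega

-- length of range(k, i+1, k): the chapter's i//k full pages (none when i < 0)
theorem wb_len (k i : Int) (hk : 1 ≤ k) :
    ((PySem.List.pyRange k (i + 1) k).length : Int) =
      if 0 ≤ i then PySem.Int.floordiv i k else 0 := by
  rw [PySem.List.pyRange_of_pos k (i + 1) (by omega : (0:Int) < k),
    List.length_map, List.length_range]
  by_cases hb : k < i + 1
  · rw [if_pos hb]
    have hi0 : 0 ≤ i := by omega
    rw [if_pos hi0]
    have he : i + 1 - k + k - 1 = i := by ring
    rw [he, PySem.Int.floordiv_eq_ediv_of_pos (by omega : (0:Int) < k)]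
    have hnn : 0 ≤ i / k := Int.ediv_nonneg (by omega) (by omega)
    exact Int.toNat_of_nonneg hnn
  · rw [if_neg hb]
    by_cases hi0 : 0 ≤ i
    · rw [if_pos hi0]
      have : PySem.Int.floordiv i k = 0 := by
        rw [(PySem.Int.floordiv_eq_iff_of_pos (by omega : (0:Int) < k) : _ ↔ _)]
        constructor <;> nlinarith
      simp [this]
    · rw [if_neg hi0]
      rfl

-- length of range(1, i+1): the chapter's problem count (none when i < 0)
theorem wb_len1 (i : Int) :
    ((PySem.List.pyRange 1 (i + 1) 1).length : Int) = if 0 ≤ i then i else 0 := by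
  rw [PySem.List.length_pyRange_one]
  have he : i + 1 - 1 = i := by ring
  rw [he]
  by_cases hi : 0 ≤ i
  · rw [if_pos hi]; exact Int.toNat_of_nonneg hi
  · rw [if_neg hi]
    have : i.toNat = 0 := Int.toNat_of_nonpos (by omega)
    simp [this]

-- A's chapter step in closed form (k ≥ 1, valid page p0 ≥ 1, any chapter size i)
theorem wb_chapter (k p0 r i : Int) (hk : 1 ≤ k) (hp : 1 ≤ p0) :
    wbChapter k (p0, r) i = ((wbAltStep k (r, p0) i).2, (wbAltStep k (r, p0) i).1) := by
  by_cases hi : 0 ≤ i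
  · have hstart : PySem.Int.floordiv (1 - 1) k = 0 := by
      rw [PySem.Int.floordiv_eq_ediv_of_pos (by omega : (0:Int) < k)]
      simp
    have hfold := wb_inner_fold k p0 hk (i.toNat) 1 (i + 1) r (by omega)
    rw [hstart] at hfold
    have hi1 : i + 1 - 1 = i := by ring
    rw [hi1] at hfold
    have hcnt := wb_count k p0 i hk hp hi
    unfold wbChapter
    rw [show ((p0, r) : Int × Int) = (p0 + 0, r) from by norm_num, hfold, hcnt]
    simp only [wbAltStep]
    rw [wb_len k i hk, wb_len1 i, if_pos hi, if_pos hi]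
    by_cases hz : PySem.Int.mod i k = 0
    · have hnz : ¬ (PySem.Int.mod i k ≠ 0) := fun h => h hz
      rw [if_neg hnz, if_neg hnz, Prod.mk.injEq]
      exact ⟨by ring, by split_ifs <;> omega⟩
    · rw [if_pos hz, if_pos hz, Prod.mk.injEq]
      exact ⟨by ring, by split_ifs <;> omega⟩
  · -- i < 0: the chapter has no problems; both sides turn one page exactly when k ∤ i
    unfold wbChapter
    rw [PySem.List.pyRange_one_eq_nil (by omega : i + 1 ≤ 1)]
    simp only [List.foldl_nil, wbAltStep]
    rw [wb_len k i hk, wb_len1 i, if_neg hi, if_neg hi]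
    have hres :
        (if k = 1 then if p0 = 1 then r + 0 else r
         else
           if PySem.Int.mod (p0 - 1) (k - 1) = 0 ∧ 1 ≤ PySem.Int.floordiv (p0 - 1) (k - 1) ∧
               p0 + PySem.Int.floordiv (p0 - 1) (k - 1) - 1 ≤ i then
             (if p0 + PySem.Int.floordiv (p0 - 1) (k - 1) ≤ i then r + 1 else r) + 1
           else if p0 + PySem.Int.floordiv (p0 - 1) (k - 1) ≤ i then r + 1 else r) = r := by
      by_cases hk1 : k = 1
      · rw [if_pos hk1]
        split_ifs <;> omega
      · have hq0 : 0 ≤ PySem.Int.floordiv (p0 - 1) (k - 1) :=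
          (PySem.Int.le_floordiv_iff_mul_le (by omega : (0:Int) < k - 1)).mpr (by omega)
        rw [if_neg hk1]
        split_ifs <;> omega
    by_cases hz : PySem.Int.mod i k = 0
    · have hnz : ¬ (PySem.Int.mod i k ≠ 0) := fun h => h hz
      rw [if_neg hnz, if_neg hnz, Prod.mk.injEq]
      exact ⟨by omega, hres.symm⟩
    · rw [if_pos hz, if_pos hz, Prod.mk.injEq]
      exact ⟨by omega, hres.symm⟩

-- ===== VERDICT (by name: the statement is the Claim_ definition above) =====
theorem workbook_spec : Claim_equal_workbook := by
  intro n k arr hdom hpre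
  have hk : 1 ≤ k := hpre
  unfold Spec_workbook workbook workbook_alt
  suffices h : ∀ (l : List Int) (p0 r : Int), 1 ≤ p0 →
      l.foldl (wbChapter k) (p0, r) =
        ((l.foldl (wbAltStep k) (r, p0)).2, (l.foldl (wbAltStep k) (r, p0)).1) by
    rw [h arr 1 0 (by omega)]
  intro l
  induction l with
  | nil => intro p0 r _; rfl
  | cons i l ih =>
    intro p0 r hp
    rw [List.foldl_cons, List.foldl_cons, wb_chapter k p0 r i hk hp]
    have hp' : 1 ≤ (wbAltStep k (r, p0) i).2 := by
      simp only [wbAltStep]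
      have hlen : (0:Int) ≤ ((PySem.List.pyRange k (i + 1) k).length : Int) :=
        Int.natCast_nonneg _
      split_ifs <;> omega
    exact ih (wbAltStep k (r, p0) i).2 (wbAltStep k (r, p0) i).1 hp'
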